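-- pv_equiv track=rewrite | github.com/andy2167565/leetcode | Medium/2925_maximum-score-after-applying-operations-on-a-tree/maximum-score-after-applying-operations-on-a-tree.py | maximumScoreAfterOperations
-- ===== SOURCE A (Python) =====
-- from typing import List
--
-- def maximumScoreAfterOperations(edges: List[List[int]], values: List[int]) -> int:
--     import collections
--
--     def dfs(node, parent):
--         if node and graph[node] == [parent]:  # Leaf node
--             return values[node]
--         child_sum = sum(dfs(child, node) for child in graph[node] if child != parent)  # The sum of value of child nodes
--         return min(child_sum, values[node])
--
--     graph = collections.defaultdict(list)
--     for a, b in edges: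
--         graph[a].append(b)
--         graph[b].append(a)
--     return sum(values) - dfs(0, -1)
-- ===== SOURCE B (Python) =====
-- from typing import List
--
-- def maximumScoreAfterOperations(edges: List[List[int]], values: List[int]) -> int:
--     adj = {}
--     for e in edges:
--         a = e[0]
--         b = e[1]
--         adj.setdefault(a, []).append(b)
--         adj.setdefault(b, []).append(a)
--     # iterative BFS from the root, recording each node's parent and the visit order
--     order = [0]
--     visited = {0}
--     parent = {}
--     i = 0
--     while i < len(order):
--         v = order[i]
--         for w in adj.get(v, []):
--             if w not in visited:
--                 visited.add(w)
--                 parent[w] = v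
--                 order.append(w)
--         i = i + 1
--     # bottom-up dp over reverse BFS order: dp[v] = min cost to cut every leaf of
--     # v's subtree away from v (values[v] for a non-root leaf)
--     childsum = {}
--     haschild = set()
--     dp = {}
--     for v in reversed(order):
--         if v != 0 and v not in haschild:
--             dpv = values[v]
--         else:
--             dpv = min(childsum.get(v, 0), values[v])
--         dp[v] = dpv
--         p = parent.get(v, -1)
--         if p != -1:
--             childsum[p] = childsum.get(p, 0) + dpv
--             haschild.add(p)
--     return sum(values) - dp[0]
-- ===== Notes on version B (the rewrite author's own statement) =====
-- stated objective: alternative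
-- what changed: Replaced A's recursive top-down DFS (min-cost returned up the call stack) by an iterative bottom-up computation: an explicit BFS from the root records each node's parent and visit order, then one dp pass over the reverse BFS order accumulates each node's child-cost sum, returning sum(values) - dp[0].
-- outside the precondition, e.g. on maximumScoreAfterOperations([[0, -1]], [2, 3]): A returns 5, B returns 3; on maximumScoreAfterOperations([[0, 1], [0, 1]], [5, 5]): A returns 10, B returns 5
import Mathlib
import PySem

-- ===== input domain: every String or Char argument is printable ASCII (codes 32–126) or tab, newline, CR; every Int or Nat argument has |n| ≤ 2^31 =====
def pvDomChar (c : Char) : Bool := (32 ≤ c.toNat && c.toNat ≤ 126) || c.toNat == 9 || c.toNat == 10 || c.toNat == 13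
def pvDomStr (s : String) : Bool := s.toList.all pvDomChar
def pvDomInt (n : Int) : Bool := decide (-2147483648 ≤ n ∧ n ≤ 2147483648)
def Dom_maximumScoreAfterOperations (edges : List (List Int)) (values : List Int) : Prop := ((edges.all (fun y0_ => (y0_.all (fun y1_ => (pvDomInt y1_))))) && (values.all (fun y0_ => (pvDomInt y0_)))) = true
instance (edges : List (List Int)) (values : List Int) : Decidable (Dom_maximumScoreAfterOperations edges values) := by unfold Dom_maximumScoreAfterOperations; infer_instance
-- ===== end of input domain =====

-- B replaces A's recursive DFS by an iterative BFS (recording parents) followed by one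
-- bottom-up dp pass over the reverse BFS order; same return value on every tree input.

-- ===== PORT A =====
-- graph = defaultdict(list); for a, b in edges: graph[a].append(b); graph[b].append(a)
def pvGraphA (edges : List (List Int)) : PySem.Dict Int (List Int) :=
  edges.foldl (fun g e =>
    (g.modify (PySem.List.pyGetD e 0 0) [] (· ++ [PySem.List.pyGetD e 1 0])).modify
      (PySem.List.pyGetD e 1 0) [] (· ++ [PySem.List.pyGetD e 0 0])) PySem.Dict.empty

-- def dfs(node, parent): … (fuel added only for termination; a tree's recursion depth is < len(values)+1)
def pvDfsA (g : PySem.Dict Int (List Int)) (values : List Int) : Nat → Int → Int → Int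
  | 0, _, _ => 0
  | fuel+1, node, parent =>
    let nbrs := g.getD node []
    if node ≠ 0 ∧ nbrs = [parent] then PySem.List.pyGetD values node 0
    else
      let childSum := ((nbrs.filter (fun c => c ≠ parent)).map (fun c => pvDfsA g values fuel c node)).sum
      min childSum (PySem.List.pyGetD values node 0)

def maximumScoreAfterOperations (edges : List (List Int)) (values : List Int) : Int :=
  values.sum - pvDfsA (pvGraphA edges) values (values.length + 1) 0 (-1)

-- ===== PORT B =====
-- adjacency dict build (Source B: adj.setdefault(a, []).append(b) — append to the entry, default [])
def pvAdjD (edges : List (List Int)) : PySem.Dict Int (List Int) :=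
  edges.foldl (fun adj e =>
    (adj.modify (PySem.List.pyGetD e 0 0) [] (· ++ [PySem.List.pyGetD e 1 0])).modify
      (PySem.List.pyGetD e 1 0) [] (· ++ [PySem.List.pyGetD e 0 0])) PySem.Dict.empty

-- while i < len(order): v = order[i]; for w in adj.get(v, []): if w not in visited: mark/record/append
-- (fuel added only for termination; the loop runs at most len(order) ≤ 2*len(edges)+1 times)
def pvBfsB (adj : PySem.Dict Int (List Int)) :
    Nat → Nat → List Int → PySem.Set Int → PySem.Dict Int Int → List Int × PySem.Dict Int Int
  | 0, _, order, _, parent => (order, parent)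
  | f+1, i, order, visited, parent =>
    if i < order.length then
      let v := PySem.List.pyGetD order (i : Int) 0
      let st := (adj.getD v []).foldl
        (fun (s : List Int × PySem.Set Int × PySem.Dict Int Int) w =>
          if w ∈ s.2.1 then s
          else (s.1 ++ [w], s.2.1.add w, s.2.2.insert w v)) (order, visited, parent)
      pvBfsB adj f (i+1) st.1 st.2.1 st.2.2
    else (order, parent)

-- body of `for v in reversed(order)`: state is (childsum, haschild, dp)
def pvDpStepB (values : List Int) (parent : PySem.Dict Int Int)
    (s : PySem.Dict Int Int × PySem.Set Int × PySem.Dict Int Int) (v : Int) :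
    PySem.Dict Int Int × PySem.Set Int × PySem.Dict Int Int :=
  let dpv := if v ≠ 0 ∧ ¬ (v ∈ s.2.1) then PySem.List.pyGetD values v 0
             else min (s.1.getD v 0) (PySem.List.pyGetD values v 0)
  let dp := s.2.2.insert v dpv
  let p := parent.getD v (-1)
  if p ≠ -1 then (s.1.insert p (s.1.getD p 0 + dpv), s.2.1.add p, dp)
  else (s.1, s.2.1, dp)

def maximumScoreAfterOperations_alt (edges : List (List Int)) (values : List Int) : Int :=
  let adj := pvAdjD edges
  let op := pvBfsB adj (2 * edges.length + 2) 0 [0] (PySem.Set.ofList [0]) PySem.Dict.empty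
  let st := op.1.reverse.foldl (pvDpStepB values op.2)
    (PySem.Dict.empty, PySem.Set.ofList [], PySem.Dict.empty)
  values.sum - st.2.2.getD 0 0

-- ===== PRECONDITION & SPEC =====
-- reference (multiset) adjacency of a node, in A's construction order
def pvAdjL (edges : List (List Int)) (v : Int) : List Int :=
  edges.flatMap (fun e =>
    (if PySem.List.pyGetD e 0 0 = v then [PySem.List.pyGetD e 1 0] else []) ++
    (if PySem.List.pyGetD e 1 0 = v then [PySem.List.pyGetD e 0 0] else []))

-- BFS layers over the node range 0..n-1: after k rounds, node v carries its distance from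
-- node 0 if that distance is ≤ k (propagation only through in-range nodes)
def pvDepL (edges : List (List Int)) (n : Nat) : Nat → List (Option Nat)
  | 0 => (List.range n).map (fun v => if v = 0 then some 0 else none)
  | k+1 =>
    let d := pvDepL edges n k
    (List.range n).map (fun v =>
      match d.getD v none with
      | some j => some j
      | none =>
        if (pvAdjL edges (v : Int)).any
            (fun u => decide (0 ≤ u) && (d.getD u.toNat none == some k))
        then some (k+1) else none)

def pvDepth (edges : List (List Int)) (n : Nat) (v : Int) : Option Nat :=
  (pvDepL edges n n).getD v.toNat none

def pvDepD (edges : List (List Int)) (n : Nat) (v : Int) : Nat := (pvDepth edges n v).getD 0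

-- Pre_ = the problem's stated domain, localised to the part of the graph A actually walks:
-- every edge is a pair, and the connected component of node 0 is a tree whose nodes all lie
-- in 0..len(values)-1 (every node of the component has a BFS distance from 0; each of its
-- edges joins consecutive BFS levels; each non-root component node has exactly one neighbour
-- one level up).  Edges not connected to node 0 are unconstrained: A never visits them.
-- On inputs outside this contract A either raises (ValueError/IndexError on a short edge or
-- an out-of-range node, RecursionError on a cycle reachable from 0) or its value hinges on
-- accidents of its implementation (negative-index wraparound into values[], the -1 parent
-- sentinel colliding with a node named -1, double visits along multi-edges).
def Pre_maximumScoreAfterOperations (edges : List (List Int)) (values : List Int) : Prop :=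
  0 < values.length ∧
  (∀ e ∈ edges, e.length = 2) ∧
  (∀ v : Nat, v < values.length → (pvDepth edges values.length (v : Int)).isSome = true →
    (∀ u ∈ pvAdjL edges (v : Int),
      0 ≤ u ∧ u < (values.length : Int) ∧ (pvDepth edges values.length u).isSome = true ∧
      (pvDepD edges values.length u = pvDepD edges values.length (v : Int) + 1 ∨
       pvDepD edges values.length (v : Int) = pvDepD edges values.length u + 1)) ∧
    ((v : Int) ≠ 0 → ((pvAdjL edges (v : Int)).filter
        (fun u => pvDepD edges values.length u + 1 == pvDepD edges values.length (v : Int))).length = 1))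

instance (edges : List (List Int)) (values : List Int) : Decidable (Pre_maximumScoreAfterOperations edges values) := by
  unfold Pre_maximumScoreAfterOperations; infer_instance

def pvWitness_maximumScoreAfterOperations : List (List Int) × List Int :=
  ([[0, 1], [2, 1]], [5, -2, 3])

def Spec_maximumScoreAfterOperations (edges : List (List Int)) (values : List Int) (out : Int) : Prop := out = maximumScoreAfterOperations_alt edges values
instance (edges : List (List Int)) (values : List Int) (out : Int) : Decidable (Spec_maximumScoreAfterOperations edges values out) := by unfold Spec_maximumScoreAfterOperations; infer_instance

-- ===== CLAIM (what is proved, stated in full; the proofs are below) =====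
def Claim_equal_maximumScoreAfterOperations : Prop := ∀ (edges : List (List Int)) (values : List Int), Dom_maximumScoreAfterOperations edges values → Pre_maximumScoreAfterOperations edges values → Spec_maximumScoreAfterOperations edges values (maximumScoreAfterOperations edges values)

-- ===== LEMMAS AND PROOFS =====

def pvReach (edges : List (List Int)) (n : Nat) (v : Int) : Prop :=
  0 ≤ v ∧ v < (n : Int) ∧ (pvDepth edges n v).isSome = true

def pvPar (edges : List (List Int)) (n : Nat) (v : Int) : Int :=
  ((pvAdjL edges v).filter (fun u => pvDepD edges n u + 1 == pvDepD edges n v)).headD 0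

def pvKids (edges : List (List Int)) (n : Nat) (v : Int) : List Int :=
  (pvAdjL edges v).filter (fun u => pvDepD edges n u == pvDepD edges n v + 1)

def pvParArg (edges : List (List Int)) (n : Nat) (v : Int) : Int :=
  if v = 0 then -1 else pvPar edges n v

def pvCostF (edges : List (List Int)) (values : List Int) : Nat → Int → Int
  | 0, _ => 0
  | k+1, v =>
    if v ≠ 0 ∧ pvKids edges values.length v = [] then PySem.List.pyGetD values v 0
    else min (((pvKids edges values.length v).map (pvCostF edges values k)).sum)
             (PySem.List.pyGetD values v 0)

def pvCostC (edges : List (List Int)) (values : List Int) (v : Int) : Int :=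
  pvCostF edges values (values.length + 1) v

-- index helpers
theorem pv_get_nat {α : Type} (xs : List α) (i : Nat) (d : α) (h : i < xs.length) :
    PySem.List.pyGetD xs (i : Int) d = xs[i] := by
  rw [PySem.List.pyGetD_natCast, List.getD_eq_getElem?_getD, List.getElem?_eq_getElem h]
  rfl

theorem pv_getD_map_range {α : Type} (n v : Nat) (f : Nat → α) (d : α) (h : v < n) :
    (((List.range n).map f).getD v d) = f v := by
  rw [List.getD_eq_getElem?_getD]
  simp [h]

theorem pv_getD_oob {α : Type} (l : List α) (v : Nat) (d : α) (h : l.length ≤ v) :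
    l.getD v d = d := by
  rw [List.getD_eq_getElem?_getD, List.getElem?_eq_none (by omega)]
  rfl

-- depL machinery
theorem pv_depL_length (edges : List (List Int)) (n k : Nat) : (pvDepL edges n k).length = n := by
  cases k <;> simp [pvDepL]

theorem pv_depL_inrange (edges : List (List Int)) {n k v : Nat} {j : Nat}
    (h : (pvDepL edges n k).getD v none = some j) : v < n := by
  by_contra hv
  rw [pv_getD_oob _ _ _ (by rw [pv_depL_length]; omega)] at h
  simp at h

theorem pv_depL_succ (edges : List (List Int)) (n k v : Nat) (h : v < n) :
    (pvDepL edges n (k+1)).getD v none =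
      match (pvDepL edges n k).getD v none with
      | some j => some j
      | none =>
        if (pvAdjL edges (v : Int)).any
            (fun u => decide (0 ≤ u) && ((pvDepL edges n k).getD u.toNat none == some k))
        then some (k+1) else none := by
  conv_lhs => rw [pvDepL]
  rw [pv_getD_map_range _ _ _ _ h]

theorem pv_depL_zero (edges : List (List Int)) (n v : Nat) (h : v < n) :
    (pvDepL edges n 0).getD v none = if v = 0 then some 0 else none := by
  rw [pvDepL, pv_getD_map_range _ _ _ _ h]

theorem pv_depL_mono_succ (edges : List (List Int)) (n k : Nat) (v : Nat) (j : Nat)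
    (h : (pvDepL edges n k).getD v none = some j) :
    (pvDepL edges n (k+1)).getD v none = some j := by
  rw [pv_depL_succ _ _ _ _ (pv_depL_inrange edges h), h]

theorem pv_depL_mono (edges : List (List Int)) (n : Nat) (v : Nat) (j : Nat) {k k' : Nat}
    (hkk : k ≤ k') (h : (pvDepL edges n k).getD v none = some j) :
    (pvDepL edges n k').getD v none = some j := by
  induction k' with
  | zero => have : k = 0 := by omega
            subst this; exact h
  | succ k'' ih =>
    rcases Nat.lt_or_ge k (k''+1) with hlt | hge
    · exact pv_depL_mono_succ _ _ _ _ _ (ih (by omega))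
    · have : k = k'' + 1 := by omega
      subst this; exact h

theorem pv_depL_le (edges : List (List Int)) (n : Nat) (v : Nat) (j : Nat) (k : Nat)
    (h : (pvDepL edges n k).getD v none = some j) : j ≤ k := by
  induction k generalizing j with
  | zero =>
    rw [pv_depL_zero _ _ _ (pv_depL_inrange edges h)] at h
    split at h
    · injection h with h; omega
    · simp at h
  | succ k' ih =>
    rw [pv_depL_succ _ _ _ _ (pv_depL_inrange edges h)] at h
    revert h
    split
    · rename_i j' hj'
      intro h
      injection h with h
      have := ih _ hj'
      omega
    · split
      · intro h; injection h with h; omega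
      · intro h; simp at h

theorem pv_depL_first (edges : List (List Int)) (n : Nat) (v : Nat) (j : Nat) (k : Nat)
    (h : (pvDepL edges n k).getD v none = some j) :
    (pvDepL edges n j).getD v none = some j := by
  induction k generalizing j with
  | zero =>
    have := pv_depL_le edges n v j 0 h
    have hj : j = 0 := by omega
    subst hj; exact h
  | succ k' ih =>
    have hv := pv_depL_inrange edges h
    rw [pv_depL_succ _ _ _ _ hv] at h
    rcases hd : (pvDepL edges n k').getD v none with _ | j'
    · rw [hd] at h
      simp only at h
      split at h
      · injection h with h
        subst h
        rw [pv_depL_succ _ _ _ _ hv, hd]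
        rename_i hcond
        rw [if_pos hcond]
      · simp at h
    · rw [hd] at h
      simp only at h
      injection h with h
      subst h
      exact ih _ hd

theorem pv_depL_zero_iff (edges : List (List Int)) (n : Nat) (hn : 0 < n) (v : Nat) (hv : v < n) (k : Nat) :
    ((pvDepL edges n k).getD v none = some 0 ↔ v = 0) := by
  constructor
  · intro h
    have h0 := pv_depL_first edges n v 0 k h
    rw [pv_depL_zero _ _ _ hv] at h0
    by_contra hv0
    simp [hv0] at h0
  · rintro rfl
    have h0 : (pvDepL edges n 0).getD 0 none = some 0 := by
      rw [pv_depL_zero _ _ _ hn]; simp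
    exact pv_depL_mono edges n 0 0 (Nat.zero_le k) h0

theorem pv_depL_src (edges : List (List Int)) (n : Nat) (v : Nat) (j : Nat) (k : Nat)
    (h : (pvDepL edges n k).getD v none = some (j+1)) :
    ∃ u ∈ pvAdjL edges (v : Int), 0 ≤ u ∧ (pvDepL edges n j).getD u.toNat none = some j := by
  have hf := pv_depL_first edges n v (j+1) k h
  have hv := pv_depL_inrange edges h
  rw [pv_depL_succ _ _ _ _ hv] at hf
  rcases hd : (pvDepL edges n j).getD v none with _ | j'
  · rw [hd] at hf
    simp only at hf
    split at hf
    · rename_i hcond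
      obtain ⟨u, hu, hdec⟩ := List.any_eq_true.mp hcond
      simp only [Bool.and_eq_true, decide_eq_true_eq, beq_iff_eq] at hdec
      exact ⟨u, hu, hdec.1, hdec.2⟩
    · simp at hf
  · rw [hd] at hf
    simp only at hf
    injection hf with hf
    have := pv_depL_le edges n v j' j hd
    omega

-- adjacency lemmas
theorem pv_adjL_cons (e : List Int) (es : List (List Int)) (v : Int) :
    pvAdjL (e :: es) v =
      ((if PySem.List.pyGetD e 0 0 = v then [PySem.List.pyGetD e 1 0] else []) ++
       (if PySem.List.pyGetD e 1 0 = v then [PySem.List.pyGetD e 0 0] else [])) ++ pvAdjL es v := by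
  simp [pvAdjL]

theorem pv_adjL_count (edges : List (List Int)) (u v : Int) :
    (pvAdjL edges u).count v = (pvAdjL edges v).count u := by
  induction edges with
  | nil => rfl
  | cons e es ih =>
    rw [pv_adjL_cons, pv_adjL_cons, List.count_append, List.count_append, ih]
    congr 1
    split_ifs <;> simp_all [List.count_cons, List.count_nil] <;> omega

theorem pv_adjL_mem_symm (edges : List (List Int)) (u v : Int) :
    u ∈ pvAdjL edges v ↔ v ∈ pvAdjL edges u := by
  rw [← List.count_pos_iff, ← List.count_pos_iff, pv_adjL_count]

-- the structural facts Pre_ provides, at the Int level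

-- the structural facts Pre_ provides, at the Int level
structure PvFacts (edges : List (List Int)) (n : Nat) : Prop where
  hn : 0 < n
  adj : ∀ v u : Int, pvReach edges n v → u ∈ pvAdjL edges v →
    pvReach edges n u ∧
    (pvDepD edges n u = pvDepD edges n v + 1 ∨ pvDepD edges n v = pvDepD edges n u + 1)
  puniq : ∀ v : Int, pvReach edges n v → v ≠ 0 →
    ((pvAdjL edges v).filter (fun u => pvDepD edges n u + 1 == pvDepD edges n v)).length = 1

theorem pv_reach_depth {edges : List (List Int)} {n : Nat} {v : Int}
    (hv : pvReach edges n v) : pvDepth edges n v = some (pvDepD edges n v) := by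
  obtain ⟨_, _, hs⟩ := hv
  rcases hd : pvDepth edges n v with _ | j
  · rw [hd] at hs
    simp at hs
  · simp [pvDepD, hd]

theorem pv_facts (edges : List (List Int)) (values : List Int)
    (hP : Pre_maximumScoreAfterOperations edges values) : PvFacts edges values.length := by
  obtain ⟨hn, _h2, hD⟩ := hP
  refine ⟨hn, ?_, ?_⟩
  · intro v u hv hu
    obtain ⟨hv0, hvn, hvs⟩ := hv
    have := (hD v.toNat (by omega) (by rw [show ((v.toNat : Nat) : Int) = v by omega]; exact hvs)).1
    rw [show ((v.toNat : Nat) : Int) = v by omega] at this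
    obtain ⟨hu0, hun, hus, hdich⟩ := this u hu
    exact ⟨⟨hu0, hun, hus⟩, hdich⟩
  · intro v hv hv0
    obtain ⟨hv0', hvn, hvs⟩ := hv
    have := (hD v.toNat (by omega) (by rw [show ((v.toNat : Nat) : Int) = v by omega]; exact hvs)).2
    rw [show ((v.toNat : Nat) : Int) = v by omega] at this
    exact this (by omega)

theorem pv_reach0 (edges : List (List Int)) (n : Nat) (hn : 0 < n) : pvReach edges n 0 := by
  refine ⟨le_refl 0, by exact_mod_cast hn, ?_⟩
  have h0 : (pvDepL edges n 0).getD 0 none = some 0 := by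
    rw [pv_depL_zero _ _ _ hn]
    simp
  have hm := pv_depL_mono edges n 0 0 (Nat.zero_le n) h0
  have hd : pvDepth edges n 0 = some 0 := by
    simp only [pvDepth]
    exact hm
  rw [hd]
  rfl

theorem pv_dep_le {edges : List (List Int)} {n : Nat}
    (v : Int) (hv : pvReach edges n v) : pvDepD edges n v ≤ n :=
  pv_depL_le edges n v.toNat _ n (pv_reach_depth hv)

theorem pv_dep0_iff {edges : List (List Int)} {n : Nat} (hn : 0 < n)
    (v : Int) (hv : pvReach edges n v) : pvDepD edges n v = 0 ↔ v = 0 := by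
  have hs := pv_reach_depth hv
  have hvn : v.toNat < n := by obtain ⟨h1, h2, _⟩ := hv; omega
  constructor
  · intro h
    have := (pv_depL_zero_iff edges n hn v.toNat hvn n).mp (by rw [← h]; exact hs)
    obtain ⟨h1, h2, _⟩ := hv
    omega
  · rintro rfl
    have := (pv_depL_zero_iff edges n hn 0 hn n).mpr rfl
    simp only [pvDepD, pvDepth] at *
    rw [show ((0:Int)).toNat = (0:Nat) by rfl, this]
    rfl

theorem pv_dep_src {edges : List (List Int)} {n : Nat}
    (v : Int) (hv : pvReach edges n v) (j : Nat) (h : pvDepD edges n v = j + 1) :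
    ∃ u ∈ pvAdjL edges v, pvReach edges n u ∧ pvDepD edges n u = j := by
  have hs := pv_reach_depth hv
  rw [h] at hs
  have hle := pv_depL_le edges n v.toNat (j+1) n hs
  obtain ⟨u, hu, hu0, hd⟩ := pv_depL_src edges n v.toNat j n hs
  have hun : u.toNat < n := pv_depL_inrange edges hd
  rw [show ((v.toNat : Nat) : Int) = v by obtain ⟨h1, h2, _⟩ := hv; omega] at hu
  have hdn := pv_depL_mono edges n u.toNat j (k:=j) (k':=n) (by omega) hd
  rw [List.getD_eq_getElem?_getD] at hdn
  have hdepth : pvDepth edges n u = some j := by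
    simp [pvDepth, List.getD_eq_getElem?_getD, hdn]
  refine ⟨u, hu, ⟨hu0, by omega, by rw [hdepth]; rfl⟩, ?_⟩
  simp [pvDepD, hdepth]

theorem pv_par_spec {edges : List (List Int)} {n : Nat} (hF : PvFacts edges n)
    (v : Int) (hv : pvReach edges n v) (hv0 : v ≠ 0) :
    (pvAdjL edges v).filter (fun u => pvDepD edges n u + 1 == pvDepD edges n v) = [pvPar edges n v] ∧
    pvPar edges n v ∈ pvAdjL edges v ∧
    pvDepD edges n (pvPar edges n v) + 1 = pvDepD edges n v := by
  have hl := hF.puniq v hv hv0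
  obtain ⟨a, ha⟩ := List.length_eq_one_iff.mp hl
  have hpar : pvPar edges n v = a := by rw [pvPar, ha]; rfl
  rw [hpar, ha]
  have hmem : a ∈ (pvAdjL edges v).filter (fun u => pvDepD edges n u + 1 == pvDepD edges n v) := by
    rw [ha]; exact List.mem_singleton.mpr rfl
  have := List.mem_filter.mp hmem
  exact ⟨rfl, this.1, by simpa using this.2⟩

theorem pv_dicho_full {edges : List (List Int)} {n : Nat} (hF : PvFacts edges n)
    (v u : Int) (hv : pvReach edges n v) (hu : u ∈ pvAdjL edges v) :
    (v ≠ 0 ∧ u = pvPar edges n v ∧ pvDepD edges n u + 1 = pvDepD edges n v) ∨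
    (pvDepD edges n u = pvDepD edges n v + 1 ∧ u ≠ 0 ∧ pvReach edges n u ∧ pvPar edges n u = v) := by
  obtain ⟨hurange, hdich⟩ := hF.adj v u hv hu
  rcases hdich with hkid | hpar
  · right
    have hu0 : u ≠ 0 := by
      intro h
      have := (pv_dep0_iff hF.hn u hurange).mpr h
      omega
    have hps := pv_par_spec hF u hurange hu0
    have hvmem : v ∈ (pvAdjL edges u).filter (fun w => pvDepD edges n w + 1 == pvDepD edges n u) := by
      rw [List.mem_filter]
      exact ⟨(pv_adjL_mem_symm edges v u).mpr hu, by simp [hkid]⟩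
    rw [hps.1] at hvmem
    exact ⟨hkid, hu0, hurange, (List.mem_singleton.mp hvmem).symm⟩
  · left
    have hv0 : v ≠ 0 := by
      intro h
      have := (pv_dep0_iff hF.hn v hv).mpr h
      omega
    have hps := pv_par_spec hF v hv hv0
    have humem : u ∈ (pvAdjL edges v).filter (fun w => pvDepD edges n w + 1 == pvDepD edges n v) := by
      rw [List.mem_filter]
      exact ⟨hu, by simp; omega⟩
    rw [hps.1] at humem
    exact ⟨hv0, List.mem_singleton.mp humem, by omega⟩

theorem pv_kids_mem {edges : List (List Int)} {n : Nat} (v c : Int) :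
    c ∈ pvKids edges n v ↔ (c ∈ pvAdjL edges v ∧ pvDepD edges n c = pvDepD edges n v + 1) := by
  rw [pvKids, List.mem_filter]
  simp

theorem pv_kid_spec {edges : List (List Int)} {n : Nat} (hF : PvFacts edges n)
    (v c : Int) (hv : pvReach edges n v) (hc : c ∈ pvKids edges n v) :
    pvReach edges n c ∧ c ≠ 0 ∧ pvPar edges n c = v ∧ pvDepD edges n c = pvDepD edges n v + 1 := by
  obtain ⟨hmem, hdep⟩ := (pv_kids_mem v c).mp hc
  rcases pv_dicho_full hF v c hv hmem with ⟨_, _, h⟩ | ⟨h1, h2, h3, h4⟩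
  · omega
  · exact ⟨h3, h2, h4, h1⟩

theorem pv_kid_of_par {edges : List (List Int)} {n : Nat} (hF : PvFacts edges n)
    (v c : Int) (hc : pvReach edges n c) (hc0 : c ≠ 0) (hpar : pvPar edges n c = v) :
    c ∈ pvKids edges n v := by
  have hps := pv_par_spec hF c hc hc0
  rw [pv_kids_mem]
  constructor
  · rw [pv_adjL_mem_symm]
    rw [← hpar]
    exact hps.2.1
  · rw [← hpar]
    omega

theorem pv_kid_count {edges : List (List Int)} {n : Nat} (hF : PvFacts edges n)
    (v c : Int) (hv : pvReach edges n v) (hc : c ∈ pvKids edges n v) :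
    (pvKids edges n v).count c = 1 := by
  obtain ⟨hcin, hc0, hcpar, hcdep⟩ := pv_kid_spec hF v c hv hc
  have hps := pv_par_spec hF c hcin hc0
  rw [hcpar] at hps
  have h1 : (pvKids edges n v).count c ≤ (pvAdjL edges v).count c :=
    List.filter_sublist.count_le c
  have h2 : (pvAdjL edges v).count c = (pvAdjL edges c).count v := pv_adjL_count edges v c
  have h3 : (pvAdjL edges c).count v =
      ((pvAdjL edges c).filter (fun u => pvDepD edges n u + 1 == pvDepD edges n c)).count v := by
    rw [List.count_filter]
    simp [hcdep, ← hcpar]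
  have h4 : ((pvAdjL edges c).filter (fun u => pvDepD edges n u + 1 == pvDepD edges n c)).count v ≤ 1 := by
    rw [hps.1]
    exact List.count_le_length
  have h5 : 0 < (pvKids edges n v).count c := List.count_pos_iff.mpr hc
  omega

theorem pv_filterne_eq_kids {edges : List (List Int)} {n : Nat} (hF : PvFacts edges n)
    (v : Int) (hv : pvReach edges n v) :
    (pvAdjL edges v).filter (fun u => u ≠ pvParArg edges n v) = pvKids edges n v := by
  rw [pvKids]
  apply List.filter_congr
  intro u hu
  rcases pv_dicho_full hF v u hv hu with ⟨hv0, hupar, hdep⟩ | ⟨hdep, hu0, huin, hupar⟩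
  · simp only [pvParArg, if_neg hv0]
    subst hupar
    simp
    omega
  · have hne : u ≠ pvParArg edges n v := by
      unfold pvParArg
      split
      · rename_i h0
        subst h0
        intro h
        obtain ⟨h1, _, _⟩ := huin
        omega
      · rename_i h0
        intro h
        have hps := pv_par_spec hF v hv h0
        rw [← h] at hps
        omega
    simp [hne, hdep]

theorem pv_leaf_iff {edges : List (List Int)} {n : Nat} (hF : PvFacts edges n)
    (v : Int) (hv : pvReach edges n v) (hv0 : v ≠ 0) :
    (pvAdjL edges v = [pvPar edges n v] ↔ pvKids edges n v = []) := by
  have hps := pv_par_spec hF v hv hv0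
  constructor
  · intro h
    rw [pvKids, h, List.filter_singleton]
    have hne : ((pvDepD edges n (pvPar edges n v) == pvDepD edges n v + 1) : Bool) = false := by
      simp
      omega
    rw [hne]
    rfl
  · intro h
    have hall : (pvAdjL edges v).filter (fun u => pvDepD edges n u + 1 == pvDepD edges n v) = pvAdjL edges v := by
      rw [List.filter_eq_self]
      intro u hu
      rcases pv_dicho_full hF v u hv hu with ⟨_, _, hdep⟩ | ⟨hdep, _, _, _⟩
      · simp [hdep]
      · exfalso
        have : u ∈ pvKids edges n v := (pv_kids_mem v u).mpr ⟨hu, hdep⟩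
        rw [h] at this
        exact List.not_mem_nil this
    rw [← hall, hps.1]

theorem pv_costF_stable {edges : List (List Int)} {values : List Int}
    (hF : PvFacts edges values.length) :
    ∀ (k1 k2 : Nat) (v : Int), pvReach edges values.length v →
      values.length + 1 ≤ k1 + pvDepD edges values.length v →
      values.length + 1 ≤ k2 + pvDepD edges values.length v →
      pvCostF edges values k1 v = pvCostF edges values k2 v := by
  intro k1
  induction k1 with
  | zero =>
    intro k2 v hv h1 h2
    exfalso
    have := pv_dep_le v hv
    omega
  | succ a ih =>
    intro k2 v hv h1 h2
    rcases k2 with _ | b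
    · exfalso
      have := pv_dep_le v hv
      omega
    simp only [pvCostF]
    congr 2
    congr 1
    apply List.map_congr_left
    intro c hc
    obtain ⟨hcin, hc0, hcpar, hcdep⟩ := pv_kid_spec hF v c hv hc
    exact ih b c hcin (by omega) (by omega)

theorem pv_costC_eq {edges : List (List Int)} {values : List Int}
    (hF : PvFacts edges values.length) (v : Int) (hv : pvReach edges values.length v) :
    pvCostC edges values v =
      if v ≠ 0 ∧ pvKids edges values.length v = [] then PySem.List.pyGetD values v 0
      else min (((pvKids edges values.length v).map (pvCostC edges values)).sum)
               (PySem.List.pyGetD values v 0) := by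
  rw [pvCostC]
  simp only [pvCostF]
  congr 2
  congr 1
  apply List.map_congr_left
  intro c hc
  obtain ⟨hcin, hc0, hcpar, hcdep⟩ := pv_kid_spec hF v c hv hc
  have hd := pv_dep_le v hv
  exact pv_costF_stable hF values.length (values.length + 1) c hcin (by omega) (by omega)

theorem pv_graphA_getD_gen (es : List (List Int)) (d : PySem.Dict Int (List Int)) (v : Int) :
    (es.foldl (fun g e =>
      (g.modify (PySem.List.pyGetD e 0 0) [] (· ++ [PySem.List.pyGetD e 1 0])).modify
        (PySem.List.pyGetD e 1 0) [] (· ++ [PySem.List.pyGetD e 0 0])) d).getD v []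
    = d.getD v [] ++ pvAdjL es v := by
  induction es generalizing d with
  | nil => simp [pvAdjL]
  | cons e es ih =>
    rw [List.foldl_cons, ih, pv_adjL_cons]
    simp only [PySem.Dict.getD_modify]
    rcases eq_or_ne (PySem.List.pyGetD e 1 0) v with h1 | h1
    · subst h1
      rcases eq_or_ne (PySem.List.pyGetD e 0 0) (PySem.List.pyGetD e 1 0) with h2 | h2
      · rw [h2]
        simp
      · simp [h2, Ne.symm h2]
    · rcases eq_or_ne (PySem.List.pyGetD e 0 0) v with h2 | h2
      · subst h2
        simp [h1, Ne.symm h1]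
      · simp [h1, h2, Ne.symm h1, Ne.symm h2]

theorem pv_graphA_getD (edges : List (List Int)) (v : Int) :
    (pvGraphA edges).getD v [] = pvAdjL edges v := by
  rw [pvGraphA, pv_graphA_getD_gen, PySem.Dict.getD_empty, List.nil_append]

theorem pv_dfsA_eq {edges : List (List Int)} {values : List Int}
    (hF : PvFacts edges values.length) :
    ∀ (k : Nat) (v : Int), pvReach edges values.length v →
      values.length + 1 ≤ k + pvDepD edges values.length v →
      pvDfsA (pvGraphA edges) values k v (pvParArg edges values.length v) = pvCostC edges values v := by
  intro k
  induction k with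
  | zero =>
    intro v hv hb
    exfalso
    have := pv_dep_le v hv
    omega
  | succ a ih =>
    intro v hv hb
    rw [pv_costC_eq hF v hv]
    simp only [pvDfsA, pv_graphA_getD]
    have hcond : (v ≠ 0 ∧ pvAdjL edges v = [pvParArg edges values.length v]) ↔
        (v ≠ 0 ∧ pvKids edges values.length v = []) := by
      constructor
      · rintro ⟨hv0, h⟩
        rw [pvParArg, if_neg hv0] at h
        exact ⟨hv0, (pv_leaf_iff hF v hv hv0).mp h⟩
      · rintro ⟨hv0, h⟩
        rw [pvParArg, if_neg hv0]
        exact ⟨hv0, (pv_leaf_iff hF v hv hv0).mpr h⟩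
    by_cases hc : v ≠ 0 ∧ pvKids edges values.length v = []
    · rw [if_pos (hcond.mpr hc), if_pos hc]
    · rw [if_neg (fun h => hc (hcond.mp h)), if_neg hc]
      congr 2
      rw [pv_filterne_eq_kids hF v hv]
      apply List.map_congr_left
      intro c hcmem
      obtain ⟨hcin, hc0, hcpar, hcdep⟩ := pv_kid_spec hF v c hv hcmem
      have : pvParArg edges values.length c = v := by
        rw [pvParArg, if_neg hc0, hcpar]
      rw [← this]
      exact ih c hcin (by omega)

theorem pv_A_eq (edges : List (List Int)) (values : List Int)
    (hP : Pre_maximumScoreAfterOperations edges values) :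
    maximumScoreAfterOperations edges values = values.sum - pvCostC edges values 0 := by
  have hF := pv_facts edges values hP
  rw [maximumScoreAfterOperations]
  congr 1
  have h0 : pvReach edges values.length 0 := pv_reach0 edges values.length hF.hn
  have hd0 : pvDepD edges values.length 0 = 0 := (pv_dep0_iff hF.hn 0 h0).mpr rfl
  have := pv_dfsA_eq hF (values.length + 1) 0 h0 (by omega)
  rw [pvParArg] at this
  simpa using this

theorem pv_adjD_getD (edges : List (List Int)) (v : Int) :
    (pvAdjD edges).getD v [] = pvAdjL edges v := by
  rw [pvAdjD, pv_graphA_getD_gen, PySem.Dict.getD_empty, List.nil_append]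

def pvEnds (edges : List (List Int)) : List Int :=
  0 :: edges.flatMap (fun e => [PySem.List.pyGetD e 0 0, PySem.List.pyGetD e 1 0])

theorem pv_adjL_sub_ends (edges : List (List Int)) (v u : Int) (hu : u ∈ pvAdjL edges v) :
    u ∈ pvEnds edges := by
  obtain ⟨e, he, hmem⟩ := List.mem_flatMap.mp hu
  rw [pvEnds, List.mem_cons]
  right
  rw [List.mem_flatMap]
  refine ⟨e, he, ?_⟩
  rcases List.mem_append.mp hmem with h | h <;> split at h <;>
    simp only [List.mem_singleton, List.not_mem_nil] at h <;> subst h <;> simp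

theorem pv_zero_mem_ends (edges : List (List Int)) : (0 : Int) ∈ pvEnds edges := by
  rw [pvEnds]
  exact List.mem_cons_self

theorem pv_ends_length (edges : List (List Int)) :
    (pvEnds edges).length = 2 * edges.length + 1 := by
  rw [pvEnds, List.length_cons]
  congr 1
  induction edges with
  | nil => rfl
  | cons e es ih =>
    rw [List.flatMap_cons, List.length_append, ih, List.length_cons]
    simp
    omega

theorem pv_nodup_length_ends (edges : List (List Int)) (l : List Int) (hnd : l.Nodup)
    (hsub : ∀ v ∈ l, v ∈ pvEnds edges) : l.length ≤ 2 * edges.length + 1 := by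
  classical
  have hcard : l.toFinset.card = l.length := List.toFinset_card_of_nodup hnd
  have hsub' : l.toFinset ⊆ (pvEnds edges).toFinset := by
    intro x hx
    exact List.mem_toFinset.mpr (hsub x (List.mem_toFinset.mp hx))
  have h1 := Finset.card_le_card hsub'
  have h2 : (pvEnds edges).toFinset.card ≤ (pvEnds edges).length := List.toFinset_card_le _
  have h3 := pv_ends_length edges
  omega

structure PvBCore (edges : List (List Int)) (n m : Nat)
    (order : List Int) (visited : PySem.Set Int) (parent : PySem.Dict Int Int) : Prop where
  head : order.head? = some 0
  nodup : order.Nodup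
  reach : ∀ v ∈ order, pvReach edges n v
  ends : ∀ v ∈ order, v ∈ pvEnds edges
  vis : ∀ u : Int, u ∈ visited ↔ u ∈ order
  par0 : parent.getD 0 (-1) = -1
  parval : ∀ c ∈ order, c ≠ 0 →
    parent.getD c (-1) = pvPar edges n c ∧ pvPar edges n c ∈ order.take m
  order_par : ∀ (j k : Nat) (hj : j < order.length) (hk : k < order.length),
    order[k] ≠ 0 → pvPar edges n (order[k]) = order[j] → j < k

structure PvBFinal (edges : List (List Int)) (n : Nat)
    (order : List Int) (parent : PySem.Dict Int Int) : Prop where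
  head : order.head? = some 0
  nodup : order.Nodup
  reach : ∀ v ∈ order, pvReach edges n v
  par0 : parent.getD 0 (-1) = -1
  parval : ∀ c ∈ order, c ≠ 0 → parent.getD c (-1) = pvPar edges n c
  order_par : ∀ (j k : Nat) (hj : j < order.length) (hk : k < order.length),
    order[k] ≠ 0 → pvPar edges n (order[k]) = order[j] → j < k
  closure : ∀ v ∈ order, ∀ u ∈ pvAdjL edges v, u ∈ order

theorem pv_take_mono {α : Type} (l : List α) (i : Nat) (x : α) (h : x ∈ l.take i) :
    x ∈ l.take (i+1) := by
  have : l.take i = (l.take (i+1)).take i := by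
    rw [List.take_take]
    congr 1
    omega
  rw [this] at h
  exact List.mem_of_mem_take h

theorem pv_bfs_inner {edges : List (List Int)} {n : Nat} (hF : PvFacts edges n)
    (v : Int) (i : Nat) :
    ∀ (l₂ l₁ order : List Int) (visited : PySem.Set Int) (parent : PySem.Dict Int Int),
      pvAdjL edges v = l₁ ++ l₂ →
      i < order.length →
      order[i]? = some v →
      PvBCore edges n (i+1) order visited parent →
      (∀ u ∈ l₁, u ∈ order) →
      ∃ order' visited' parent',
        (l₂.foldl (fun (s : List Int × PySem.Set Int × PySem.Dict Int Int) w =>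
          if w ∈ s.2.1 then s
          else (s.1 ++ [w], s.2.1.add w, s.2.2.insert w v)) (order, visited, parent))
          = (order', visited', parent') ∧
        (∃ ext, order' = order ++ ext) ∧
        PvBCore edges n (i+1) order' visited' parent' ∧
        (∀ u ∈ pvAdjL edges v, u ∈ order') := by
  intro l₂
  induction l₂ with
  | nil =>
    intro l₁ order visited parent hsplit hi hvi hC hdone
    refine ⟨order, visited, parent, rfl, ⟨[], by simp⟩, hC, ?_⟩
    intro u hu
    rw [hsplit, List.append_nil] at hu
    exact hdone u hu
  | cons w l₂ ih =>
    intro l₁ order visited parent hsplit hi hvi hC hdone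
    have hvmem : v ∈ order := by
      have := List.getElem?_eq_some_iff.mp hvi
      obtain ⟨h, rfl⟩ := this
      exact List.getElem_mem _
    have hvin : pvReach edges n v := hC.reach v hvmem
    have hwadj : w ∈ pvAdjL edges v := by rw [hsplit]; simp
    have hwin : pvReach edges n w := (hF.adj v w hvin hwadj).1
    have hwends : w ∈ pvEnds edges := pv_adjL_sub_ends edges v w hwadj
    rw [List.foldl_cons]
    by_cases hvis : w ∈ visited
    · rw [if_pos hvis]
      have hwmem : w ∈ order := (hC.vis w).mp hvis
      exact ih (l₁ ++ [w]) order visited parent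
        (by rw [hsplit, List.append_assoc]; rfl) hi hvi hC
        (by
          intro u hu
          rcases List.mem_append.mp hu with h | h
          · exact hdone u h
          · rw [List.mem_singleton.mp h]
            exact hwmem)
    · rw [if_neg hvis]
      have hword : w ∉ order := fun h => hvis ((hC.vis w).mpr h)
      have h0mem : (0 : Int) ∈ order := List.mem_of_mem_head? (by rw [hC.head]; rfl)
      have hw0 : w ≠ 0 := fun h => hword (h ▸ h0mem)
      have hparw : pvPar edges n w = v := by
        rcases pv_dicho_full hF v w hvin hwadj with ⟨hv0, hwp, _⟩ | ⟨_, _, _, hp⟩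
        · exfalso
          have := (hC.parval v hvmem hv0).2
          exact hword (hwp ▸ List.take_subset _ _ this)
        · exact hp
      have hvtake : v ∈ order.take (i+1) := by
        have hlen : i < (order.take (i+1)).length := by
          rw [List.length_take]; omega
        have hmem := List.getElem_mem (l := order.take (i+1)) (n := i) hlen
        rw [List.getElem_take] at hmem
        have hv' : order[i] = v := by
          have := List.getElem?_eq_some_iff.mp hvi
          obtain ⟨h, hh⟩ := this
          exact hh
        rw [← hv']
        exact hmem
      have hC' : PvBCore edges n (i+1) (order ++ [w]) (visited.add w) (parent.insert w v) := by
        refine ⟨?_, ?_, ?_, ?_, ?_, ?_, ?_, ?_⟩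
        · rw [List.head?_append_of_ne_nil]
          · exact hC.head
          · intro h
            have := hC.head
            rw [h] at this
            simp at this
        · simp [List.nodup_append, hC.nodup]
          exact fun a ha h => hword (h ▸ ha)
        · intro u hu
          rcases List.mem_append.mp hu with h | h
          · exact hC.reach u h
          · rw [List.mem_singleton.mp h]
            exact hwin
        · intro u hu
          rcases List.mem_append.mp hu with h | h
          · exact hC.ends u h
          · rw [List.mem_singleton.mp h]
            exact hwends
        · intro u
          rw [PySem.Set.mem_add, hC.vis u, List.mem_append, List.mem_singleton]
        · rw [PySem.Dict.getD_insert, if_neg (fun h => hw0 h.symm)]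
          exact hC.par0
        · intro c hc hc0
          rcases List.mem_append.mp hc with hcold | hcnew
          · have hcw : c ≠ w := fun h => hword (h ▸ hcold)
            have := hC.parval c hcold hc0
            constructor
            · rw [PySem.Dict.getD_insert, if_neg hcw]
              exact this.1
            · rw [List.take_append_of_le_length (by omega)]
              exact this.2
          · rw [List.mem_singleton.mp hcnew]
            constructor
            · rw [PySem.Dict.getD_insert, if_pos rfl]
              exact hparw.symm ▸ rfl
            · rw [hparw, List.take_append_of_le_length (by omega)]
              exact hvtake
        · intro j k hj hk hk0 hpar
          rw [List.length_append, List.length_singleton] at hj hk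
          by_cases hkord : k < order.length
          · have hkeq : (order ++ [w])[k] = order[k] := List.getElem_append_left hkord
            by_cases hjord : j < order.length
            · have hjeq : (order ++ [w])[j] = order[j] := List.getElem_append_left hjord
              exact hC.order_par j k hjord hkord (by rw [← hkeq]; exact hk0)
                (by rw [← hjeq, ← hkeq]; exact hpar)
            · exfalso
              have hjw : j = order.length := by omega
              have : (order ++ [w])[j] = w := by
                subst hjw
                simp
              rw [this, hkeq] at hpar
              rw [hkeq] at hk0
              have := (hC.parval order[k] (List.getElem_mem _) hk0).2
              rw [hpar] at this
              exact hword (List.take_subset _ _ this)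
          · have hkw : k = order.length := by omega
            have hkeq : (order ++ [w])[k] = w := by subst hkw; simp
            by_cases hjord : j < order.length
            · omega
            · exfalso
              have hjw : j = order.length := by omega
              have hjeq : (order ++ [w])[j] = w := by subst hjw; simp
              rw [hkeq] at hpar
              rw [hjeq] at hpar
              rw [hparw] at hpar
              exact hword (hpar ▸ hvmem)
      have hvi' : (order ++ [w])[i]? = some v := by
        rw [List.getElem?_append_left hi]
        exact hvi
      obtain ⟨o', vi', pa', heq, ⟨ext, hext⟩, hC'', hclo⟩ :=
        ih (l₁ ++ [w]) (order ++ [w]) (visited.add w) (parent.insert w v)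
          (by rw [hsplit, List.append_assoc]; rfl)
          (by rw [List.length_append]; omega) hvi' hC'
          (by
            intro u hu
            rcases List.mem_append.mp hu with h | h
            · exact List.mem_append_left _ (hdone u h)
            · exact List.mem_append_right _ h)
      refine ⟨o', vi', pa', heq, ⟨[w] ++ ext, by rw [hext, List.append_assoc]⟩, hC'', hclo⟩

theorem pv_bfs_run {edges : List (List Int)} {n : Nat} (hF : PvFacts edges n)
    (adj : PySem.Dict Int (List Int))
    (hadj : ∀ v : Int, adj.getD v [] = pvAdjL edges v) :
    ∀ (f i : Nat) (order : List Int) (visited : PySem.Set Int) (parent : PySem.Dict Int Int),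
      PvBCore edges n i order visited parent →
      i ≤ order.length →
      (∀ (j : Nat) (hj : j < order.length), j < i → ∀ u ∈ pvAdjL edges (order[j]), u ∈ order) →
      2 * edges.length + 2 ≤ f + i →
      PvBFinal edges n (pvBfsB adj f i order visited parent).1
        (pvBfsB adj f i order visited parent).2 := by
  intro f
  induction f with
  | zero =>
    intro i order visited parent hC hile hclo hb
    exfalso
    have := pv_nodup_length_ends edges order hC.nodup hC.ends
    omega
  | succ f ih =>
    intro i order visited parent hC hile hclo hb
    by_cases hlt : i < order.length
    · have hv : PySem.List.pyGetD order (i : Int) 0 = order[i] := pv_get_nat order i 0 hlt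
      have hCup : PvBCore edges n (i+1) order visited parent :=
        ⟨hC.head, hC.nodup, hC.reach, hC.ends, hC.vis, hC.par0,
         fun c hc hc0 => ⟨(hC.parval c hc hc0).1, pv_take_mono _ _ _ (hC.parval c hc hc0).2⟩,
         hC.order_par⟩
      obtain ⟨o', vi', pa', heq, ⟨ext, rfl⟩, hC'', hclo'⟩ :=
        pv_bfs_inner hF (order[i]) i (pvAdjL edges order[i]) [] order visited parent
          (by simp) hlt (by rw [List.getElem?_eq_some_iff]; exact ⟨hlt, rfl⟩) hCup
          (by intro u hu; simp at hu)
      show PvBFinal edges n (pvBfsB adj (f+1) i order visited parent).1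
            (pvBfsB adj (f+1) i order visited parent).2
      rw [pvBfsB]
      simp only [if_pos hlt]
      rw [hv, hadj _, heq]
      have hlen' : order.length ≤ (order ++ ext).length := by simp
      apply ih (i+1) (order ++ ext) vi' pa' hC'' (by omega)
      · intro j hj hji u hu
        have hjo : j < order.length := by omega
        have hjeq : (order ++ ext)[j] = order[j] := List.getElem_append_left hjo
        rcases Nat.lt_or_ge j i with hji' | hji'
        · rw [hjeq] at hu
          exact List.mem_append_left _ (hclo j hjo hji' u hu)
        · have : j = i := by omega
          subst this
          rw [hjeq] at hu
          exact hclo' u hu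
      · omega
    · have hieq : i = order.length := by omega
      rw [pvBfsB]
      simp only [if_neg hlt]
      refine ⟨hC.head, hC.nodup, hC.reach, hC.par0,
        fun c hc hc0 => (hC.parval c hc hc0).1, hC.order_par, ?_⟩
      intro v hvmem u hu
      obtain ⟨j, hj, rfl⟩ := List.mem_iff_getElem.mp hvmem
      exact hclo j hj (by omega) u hu

theorem pv_bfs_init {edges : List (List Int)} {n : Nat} (hF : PvFacts edges n) :
    PvBCore edges n 0 [0] (PySem.Set.ofList [0]) PySem.Dict.empty := by
  have hn := hF.hn
  refine ⟨rfl, List.nodup_singleton 0, ?_, ?_, ?_, ?_, ?_, ?_⟩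
  · intro v hv
    rw [List.mem_singleton.mp hv]
    exact pv_reach0 edges n hn
  · intro v hv
    rw [List.mem_singleton.mp hv]
    exact pv_zero_mem_ends edges
  · intro u
    rw [PySem.Set.mem_ofList]
  · rw [PySem.Dict.getD_empty]
  · intro c hc hc0
    exact absurd (List.mem_singleton.mp hc) hc0
  · intro j k hj hk hk0 hpar
    simp at hj hk
    subst hj; subst hk
    simp at hk0

theorem pv_bfs_cover {edges : List (List Int)} {n : Nat} (hF : PvFacts edges n)
    {order : List Int} {parent : PySem.Dict Int Int} (hfin : PvBFinal edges n order parent) :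
    ∀ v, pvReach edges n v → v ∈ order := by
  have key : ∀ (k : Nat) (v : Int), pvReach edges n v → pvDepD edges n v = k → v ∈ order := by
    intro k
    induction k using Nat.strong_induction_on with
    | _ k ih =>
      intro v hv hd
      rcases k with _ | j
      · have : v = 0 := (pv_dep0_iff hF.hn v hv).mp hd
        subst this
        exact List.mem_of_mem_head? (by rw [hfin.head]; rfl)
      · obtain ⟨u, hu, huin, hudep⟩ := pv_dep_src v hv j hd
        have humem : u ∈ order := ih j (by omega) u huin hudep
        exact hfin.closure u humem v ((pv_adjL_mem_symm edges u v).mp hu)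
  intro v hv
  exact key _ v hv rfl

theorem pv_filter_mem_congr (l : List Int) (x : Int) (suf : List Int) (hx : x ∉ l) :
    l.filter (fun c => decide (c ∈ x :: suf)) = l.filter (fun c => decide (c ∈ suf)) := by
  apply List.filter_congr
  intro c hc
  have hcx : c ≠ x := fun h => hx (h ▸ hc)
  simp [List.mem_cons, hcx]

theorem pv_sum_filter_cons (l : List Int) (f : Int → Int) (x : Int) (suf : List Int)
    (hcount : l.count x = 1) (hx : x ∉ suf) :
    ((l.filter (fun c => decide (c ∈ x :: suf))).map f).sum =
    ((l.filter (fun c => decide (c ∈ suf))).map f).sum + f x := by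
  induction l with
  | nil => simp at hcount
  | cons y l ih =>
    by_cases hyx : y = x
    · subst hyx
      have hcl : l.count y = 0 := by
        rw [List.count_cons_self] at hcount
        omega
      have hyl : y ∉ l := List.count_eq_zero.mp hcl
      rw [List.filter_cons, List.filter_cons]
      have h1 : (decide (y ∈ y :: suf)) = true := by simp
      have h2 : (decide (y ∈ suf)) = false := by simpa using hx
      rw [h1, h2, pv_filter_mem_congr l y suf hyl]
      simp
      omega
    · have hcount' : l.count x = 1 := by
        simpa [List.count_cons, hyx, Ne.symm hyx] using hcount
      rw [List.filter_cons, List.filter_cons]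
      by_cases hmem : y ∈ suf
      · have d1 : decide (y ∈ x :: suf) = true := by simp [List.mem_cons, hmem]
        have d2 : decide (y ∈ suf) = true := by simp [hmem]
        simp only [d1, d2, if_pos]
        simp only [List.map_cons, List.sum_cons]
        rw [ih hcount']
        omega
      · have d1 : decide (y ∈ x :: suf) = false := by simp [List.mem_cons, hyx, hmem]
        have d2 : decide (y ∈ suf) = false := by simp [hmem]
        simp only [d1, d2, Bool.false_eq_true, if_false]
        exact ih hcount'

structure PvDInv (edges : List (List Int)) (values : List Int) (suf : List Int)
    (s : PySem.Dict Int Int × PySem.Set Int × PySem.Dict Int Int) : Prop where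
  cs : ∀ v : Int, pvReach edges values.length v →
    s.1.getD v 0 =
      (((pvKids edges values.length v).filter (fun c => decide (c ∈ suf))).map
        (pvCostC edges values)).sum
  hc : ∀ v : Int, pvReach edges values.length v →
    (v ∈ s.2.1 ↔ ((pvKids edges values.length v).filter (fun c => decide (c ∈ suf))) ≠ [])
  dp : ∀ v : Int, pvReach edges values.length v →
    s.2.2.getD v 0 = if v ∈ suf then pvCostC edges values v else 0

theorem pv_kids_in_suf {edges : List (List Int)} {n : Nat} (hF : PvFacts edges n)
    {order : List Int} {parent : PySem.Dict Int Int} (hfin : PvBFinal edges n order parent)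
    (pre : List Int) (x : Int) (suf : List Int) (hsplit : order = pre ++ x :: suf) :
    ∀ c ∈ pvKids edges n x, c ∈ suf := by
  intro c hc
  have hxmem : x ∈ order := by rw [hsplit]; simp
  have hxin : pvReach edges n x := hfin.reach x hxmem
  obtain ⟨hcin, hc0, hcpar, _⟩ := pv_kid_spec hF x c hxin hc
  have hcmem : c ∈ order := pv_bfs_cover hF hfin c hcin
  obtain ⟨k, hk, hck⟩ := List.mem_iff_getElem.mp hcmem
  have hplen : pre.length < order.length := by rw [hsplit]; simp
  have hxq : order[pre.length]? = some x := by
    rw [hsplit, List.getElem?_append_right (le_refl pre.length)]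
    simp
  have hxidx : order[pre.length]'hplen = x := by
    have := List.getElem?_eq_some_iff.mp hxq
    obtain ⟨_, hh⟩ := this
    exact hh
  have hjk : pre.length < k := by
    apply hfin.order_par pre.length k hplen hk
    · rw [hck]; exact hc0
    · rw [hck, hcpar, hxidx]
  have hcq : order[k]? = some c := by
    rw [List.getElem?_eq_some_iff]
    exact ⟨hk, hck⟩
  rw [hsplit, List.getElem?_append_right (by omega)] at hcq
  rcases hm : k - pre.length with _ | m
  · omega
  · rw [hm, List.getElem?_cons_succ] at hcq
    have := List.getElem?_eq_some_iff.mp hcq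
    obtain ⟨hml, hmm⟩ := this
    rw [← hmm]
    exact List.getElem_mem _

theorem pv_dp_fold {edges : List (List Int)} {values : List Int}
    (hF : PvFacts edges values.length)
    {orderF : List Int} {parentF : PySem.Dict Int Int}
    (hfin : PvBFinal edges values.length orderF parentF) :
    ∀ (suf pre : List Int), orderF = pre ++ suf →
      PvDInv edges values suf (suf.reverse.foldl (pvDpStepB values parentF)
        (PySem.Dict.empty, PySem.Set.ofList [], PySem.Dict.empty)) := by
  intro suf
  induction suf with
  | nil =>
    intro pre hsplit
    rw [List.reverse_nil, List.foldl_nil]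
    refine ⟨?_, ?_, ?_⟩
    · intro v hv
      rw [PySem.Dict.getD_empty]
      simp
    · intro v hv
      rw [PySem.Set.mem_ofList]
      simp
    · intro v hv
      rw [PySem.Dict.getD_empty]
      simp
  | cons x suf' ih =>
    intro pre hsplit
    have hprev := ih (pre ++ [x]) (by rw [hsplit, List.append_assoc]; rfl)
    rw [List.reverse_cons, List.foldl_append, List.foldl_cons, List.foldl_nil]
    set s := suf'.reverse.foldl (pvDpStepB values parentF)
      (PySem.Dict.empty, PySem.Set.ofList ([] : List Int), PySem.Dict.empty) with hs
    have hn := hF.hn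
    have hxmem : x ∈ orderF := by rw [hsplit]; simp
    have hxin : pvReach edges values.length x := hfin.reach x hxmem
    have hkids_suf := pv_kids_in_suf hF hfin pre x suf' hsplit
    have hfull : (pvKids edges values.length x).filter (fun c => decide (c ∈ suf'))
        = pvKids edges values.length x := by
      rw [List.filter_eq_self]
      intro c hc
      simpa using hkids_suf c hc
    have hxnot : x ∉ suf' := by
      have hnd := hfin.nodup
      rw [hsplit] at hnd
      have := List.Nodup.of_append_right hnd
      exact (List.nodup_cons.mp this).1
    have hxnotkid : ∀ v : Int, pvReach edges values.length v →
        x ∈ pvKids edges values.length v → (x ≠ 0 ∧ v = pvPar edges values.length x) := by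
      intro v hv hxk
      obtain ⟨_, hx0, hxpar, _⟩ := pv_kid_spec hF v x hv hxk
      exact ⟨hx0, hxpar.symm⟩
    simp only [pvDpStepB]
    have hcsx := hprev.cs x hxin
    have hhcx := hprev.hc x hxin
    rw [hfull] at hcsx hhcx
    have hcond : (x ≠ 0 ∧ ¬ (x ∈ s.2.1)) ↔ (x ≠ 0 ∧ pvKids edges values.length x = []) := by
      rw [hhcx]
      simp
    have hdpv : (if x ≠ 0 ∧ ¬ (x ∈ s.2.1) then PySem.List.pyGetD values x 0
        else min (s.1.getD x 0) (PySem.List.pyGetD values x 0))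
        = pvCostC edges values x := by
      rw [if_congr hcond rfl rfl, hcsx, pv_costC_eq hF x hxin]
    rw [hdpv]
    have hpveq : parentF.getD x (-1) =
        (if x = 0 then -1 else pvPar edges values.length x) := by
      by_cases hx0 : x = 0
      · subst hx0
        rw [if_pos rfl]
        exact hfin.par0
      · rw [if_neg hx0]
        exact hfin.parval x hxmem hx0
    rw [hpveq]
    by_cases hx0 : x = 0
    · subst hx0
      rw [if_pos rfl, if_neg (fun h => h rfl)]
      refine ⟨?_, ?_, ?_⟩
      · intro v hv
        have h0nk : (0 : Int) ∉ pvKids edges values.length v :=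
          fun h => (pv_kid_spec hF v 0 hv h).2.1 rfl
        rw [hprev.cs v hv, pv_filter_mem_congr _ _ _ h0nk]
      · intro v hv
        have h0nk : (0 : Int) ∉ pvKids edges values.length v :=
          fun h => (pv_kid_spec hF v 0 hv h).2.1 rfl
        rw [hprev.hc v hv, pv_filter_mem_congr _ _ _ h0nk]
      · intro v hv
        rw [PySem.Dict.getD_insert]
        by_cases hv0 : v = 0
        · subst hv0
          rw [if_pos rfl, if_pos (by simp)]
        · rw [if_neg hv0, hprev.dp v hv]
          exact if_congr (by simp [hv0]) rfl rfl
    · rw [if_neg hx0]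
      have hps := pv_par_spec hF x hxin hx0
      have hPin : pvReach edges values.length (pvPar edges values.length x) :=
        (hF.adj x _ hxin hps.2.1).1
      have hPne : ¬ (pvPar edges values.length x = -1) := by
        intro h
        have := hPin.1
        rw [h] at this
        omega
      rw [if_pos hPne]
      have hxkid : x ∈ pvKids edges values.length (pvPar edges values.length x) :=
        pv_kid_of_par hF _ x hxin hx0 rfl
      have hcnt := pv_kid_count hF _ x hPin hxkid
      have hPx : pvPar edges values.length x ≠ x := by
        intro h
        have := hps.2.2
        rw [h] at this
        omega
      refine ⟨?_, ?_, ?_⟩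
      · intro v hv
        rw [PySem.Dict.getD_insert]
        by_cases hvP : v = pvPar edges values.length x
        · subst hvP
          rw [if_pos rfl, hprev.cs _ hv,
              pv_sum_filter_cons _ (pvCostC edges values) x suf' hcnt hxnot]
        · rw [if_neg hvP, hprev.cs v hv,
              pv_filter_mem_congr _ _ _ (fun h => hvP (hxnotkid v hv h).2)]
      · intro v hv
        rw [PySem.Set.mem_add]
        by_cases hvP : v = pvPar edges values.length x
        · subst hvP
          have hxf : x ∈ (pvKids edges values.length (pvPar edges values.length x)).filter
              (fun c => decide (c ∈ x :: suf')) := List.mem_filter.mpr ⟨hxkid, by simp⟩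
          have hne := List.ne_nil_of_mem hxf
          exact iff_of_true (Or.inr rfl) hne
        · have hiff := hprev.hc v hv
          rw [pv_filter_mem_congr _ _ _ (fun h => hvP (hxnotkid v hv h).2)]
          constructor
          · intro h
            rcases h with h | h
            · exact hiff.mp h
            · exact absurd h hvP
          · intro h
            exact Or.inl (hiff.mpr h)
      · intro v hv
        rw [PySem.Dict.getD_insert]
        by_cases hvx : v = x
        · subst hvx
          rw [if_pos rfl, if_pos (by simp)]
        · rw [if_neg hvx, hprev.dp v hv]
          exact if_congr (by simp [hvx]) rfl rfl

theorem pv_B_eq (edges : List (List Int)) (values : List Int)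
    (hP : Pre_maximumScoreAfterOperations edges values) :
    maximumScoreAfterOperations_alt edges values = values.sum - pvCostC edges values 0 := by
  have hF := pv_facts edges values hP
  have hn := hF.hn
  have hfin := pv_bfs_run hF (pvAdjD edges) (pv_adjD_getD edges) (2 * edges.length + 2) 0 [0]
    (PySem.Set.ofList [0]) PySem.Dict.empty (pv_bfs_init hF) (by simp)
    (by intro j hj hji; exact absurd hji (by omega)) (by omega)
  simp only [maximumScoreAfterOperations_alt]
  set op := pvBfsB (pvAdjD edges) (2 * edges.length + 2) 0 [0]
    (PySem.Set.ofList [0]) PySem.Dict.empty with hop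
  have hDI := pv_dp_fold hF hfin op.1 [] rfl
  have h0mem : (0 : Int) ∈ op.1 := List.mem_of_mem_head? (by rw [hfin.head]; rfl)
  have hdp := hDI.dp 0 (pv_reach0 edges values.length hn)
  rw [if_pos h0mem] at hdp
  rw [hdp]

theorem pv_main (edges : List (List Int)) (values : List Int)
    (hP : Pre_maximumScoreAfterOperations edges values) :
    maximumScoreAfterOperations edges values = maximumScoreAfterOperations_alt edges values := by
  rw [pv_A_eq edges values hP, pv_B_eq edges values hP]

-- ===== VERDICT (by name: the statement is the Claim_ definition above) =====
theorem maximumScoreAfterOperations_spec : Claim_equal_maximumScoreAfterOperations := by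
  intro edges values _hDom hP
  unfold Spec_maximumScoreAfterOperations
  exact pv_main edges values hP
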